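-- pv_equiv track=rewrite | github.com/joopark28/LearnedHashV1 | ConsistentHashing.py | allocateData
-- ===== SOURCE A (Python) =====
-- def allocateData(hashList):
--     ipLoad = []
--     tmpData = []
--     for i in hashList:
--
--         if (i[2]!="null"):
--             ipLoad.append([i[2],tmpData])
--             tmpData = []
--         elif(i[1]!="null"):
--             tmpData.append(i[1])
--     return ipLoad
-- ===== SOURCE B (Python) =====
-- def allocateData(hashList):
--     # Build the groups back-to-front: walking right-to-left, a marker opens a
--     # fresh group in front; a data item joins the nearest marker to its right
--     # (the current front group) or is dropped if no marker follows it.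
--     groups = []
--     for row in reversed(hashList):
--         if row[2] != "null":
--             groups.insert(0, [row[2], []])
--         elif row[1] != "null" and groups:
--             groups[0][1].insert(0, row[1])
--     return groups
-- ===== Notes on version B (the rewrite author's own statement) =====
-- stated objective: alternative
-- what changed: B traverses the list right-to-left with a fold building groups back-to-front (a data item is prepended into the nearest following marker's group), instead of A's forward pass with a pending tmpData buffer flushed at each marker.
import Mathlib
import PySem

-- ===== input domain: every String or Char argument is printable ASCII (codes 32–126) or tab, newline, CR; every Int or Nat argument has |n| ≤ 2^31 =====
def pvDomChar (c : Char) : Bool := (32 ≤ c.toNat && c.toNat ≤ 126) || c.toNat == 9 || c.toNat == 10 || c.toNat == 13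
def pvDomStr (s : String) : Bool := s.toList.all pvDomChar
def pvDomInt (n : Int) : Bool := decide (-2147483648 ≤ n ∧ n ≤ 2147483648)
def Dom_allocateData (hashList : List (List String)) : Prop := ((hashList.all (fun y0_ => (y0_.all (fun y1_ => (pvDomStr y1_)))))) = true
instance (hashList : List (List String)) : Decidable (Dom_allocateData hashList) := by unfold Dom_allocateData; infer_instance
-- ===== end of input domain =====

-- B builds the groups back-to-front by a right-to-left fold (each data item joins the
-- nearest following marker's group) instead of A's forward pass with a pending buffer;
-- objective: alternative decomposition, same cost.

-- ===== PORT A =====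
-- the for-loop of A as accumulator recursion over (ipLoad, tmpData)
def allocADgo (rows : List (List String)) (ipLoad : List (String × List String)) (tmpData : List String) : List (String × List String) :=
  match rows with
  | [] => ipLoad
  | i :: rest =>
    let v2 := (PySem.List.pyGet? i 2).getD ""          -- i[2]; Pre_ keeps the index in range
    if v2 ≠ "null" then allocADgo rest (ipLoad ++ [(v2, tmpData)]) []
    else
      let v1 := (PySem.List.pyGet? i 1).getD ""        -- i[1]
      if v1 ≠ "null" then allocADgo rest ipLoad (tmpData ++ [v1])
      else allocADgo rest ipLoad tmpData

def allocateData (hashList : List (List String)) : List (String × List String) :=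
  allocADgo hashList [] []

-- ===== PORT B =====
def allocateData_alt (hashList : List (List String)) : List (String × List String) :=
  hashList.foldr (fun row groups =>
    let v2 := (PySem.List.pyGet? row 2).getD ""        -- row[2]
    if v2 ≠ "null" then (v2, []) :: groups
    else
      let v1 := (PySem.List.pyGet? row 1).getD ""      -- row[1]
      if v1 ≠ "null" then
        match groups with
        | [] => groups                                  -- no marker to the right: drop
        | (m, d) :: gs => (m, v1 :: d) :: gs
      else groups) []

-- ===== PRECONDITION & SPEC =====
-- Pre_ excludes exactly the inputs where Python A raises IndexError: a row shorter than 3 (i[2]).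
def Pre_allocateData (hashList : List (List String)) : Prop :=
  ∀ row ∈ hashList, 3 ≤ row.length
instance (hashList : List (List String)) : Decidable (Pre_allocateData hashList) := by unfold Pre_allocateData; infer_instance

def pvWitness_allocateData : List (List String) :=
  [["a", "d1", "null"], ["b", "null", "ip1"], ["c", "null", "ip2"], ["d", "tail", "null"]]

def Spec_allocateData (hashList : List (List String)) (out : List (String × List String)) : Prop := out = allocateData_alt hashList
instance (hashList : List (List String)) (out : List (String × List String)) : Decidable (Spec_allocateData hashList out) := by unfold Spec_allocateData; infer_instance

-- ===== CLAIM (what is proved, stated in full; the proofs are below) =====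
def Claim_equal_allocateData : Prop := ∀ (hashList : List (List String)), Dom_allocateData hashList → Pre_allocateData hashList → Spec_allocateData hashList (allocateData hashList)

-- ===== LEMMAS AND PROOFS =====

-- pending buffer tmp attached to the first (leftmost) group, if any
def pvPrepend (tmp : List String) (gs : List (String × List String)) : List (String × List String) :=
  match gs with
  | [] => []
  | (m, d) :: rest => (m, tmp ++ d) :: rest

theorem allocADgo_append (rows : List (List String)) (ip : List (String × List String)) (tmp : List String) :
    allocADgo rows ip tmp = ip ++ allocADgo rows [] tmp := by
  induction rows generalizing ip tmp with
  | nil => simp [allocADgo]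
  | cons i rest ih =>
    simp only [allocADgo]
    split_ifs with h1 h2
    · rw [ih (ip ++ [((PySem.List.pyGet? i 2).getD "", tmp)]),
          ih ([] ++ [((PySem.List.pyGet? i 2).getD "", tmp)])]
      simp
    · exact ih ..
    · exact ih ..

theorem allocADgo_eq (rows : List (List String)) (tmp : List String) :
    allocADgo rows [] tmp = pvPrepend tmp (allocateData_alt rows) := by
  induction rows generalizing tmp with
  | nil => simp [allocADgo, allocateData_alt, pvPrepend]
  | cons i rest ih =>
    simp only [allocADgo, allocateData_alt, List.foldr]
    split_ifs with h1 h2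
    · rw [allocADgo_append, ih]
      cases h : (allocateData_alt rest) with
      | nil => simp [allocateData_alt] at h; simp [pvPrepend, h]
      | cons g gs => simp [allocateData_alt] at h; simp [pvPrepend, h]
    · rw [ih]
      cases h : (allocateData_alt rest) with
      | nil => simp [allocateData_alt] at h; simp [pvPrepend, h]
      | cons g gs =>
        simp [allocateData_alt] at h
        obtain ⟨m, d⟩ := g
        simp [pvPrepend, h]
    · rw [ih]; simp [allocateData_alt]

-- ===== VERDICT (by name: the statement is the Claim_ definition above) =====
theorem allocateData_spec : Claim_equal_allocateData := by
  intro hashList _ _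
  show allocateData hashList = allocateData_alt hashList
  rw [allocateData, allocADgo_eq]
  cases h : allocateData_alt hashList with
  | nil => simp [pvPrepend]
  | cons g gs => obtain ⟨m, d⟩ := g; simp [pvPrepend]
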